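-- pv_equiv track=rewrite | github.com/hmxmilohax/GoBot | GoBot.py | difficulty_bucket
-- ===== SOURCE A (Python) =====
-- from typing import Optional, Dict, List
--
-- DIFF_THRESHOLDS = {
--     "guitar":     [139, 176, 221, 267, 333, 409],
--     "drums":      [124, 151, 178, 242, 345, 448],
--     "bass":       [135, 181, 228, 293, 364, 436],
--     "vocals":     [132, 175, 218, 279, 353, 427],
--     "band":       [163, 215, 243, 267, 292, 345],
--     "keys":       [153, 211, 269, 327, 385, 443],
--     "prokeys":    [153, 211, 269, 327, 385, 443],
--     "proguitar":  [150, 205, 264, 323, 382, 442],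
--     "probass":    [150, 208, 267, 325, 384, 442],
-- }
--
-- def difficulty_bucket(instr_key: str, rank_val: Optional[int]) -> Optional[int]:
--     """Return 0..5 bucket index for rank_val on instr_key (None if no part)."""
--     if not rank_val or rank_val <= 0:
--         return None
--     th = DIFF_THRESHOLDS.get(instr_key)
--     if not th:
--         return None
--     for i in range(len(th) - 1, -1, -1):
--         if rank_val >= th[i]:
--             return i
--     return 0
-- ===== SOURCE B (Python) =====
-- # B: replace the backward linear scan with bisect_right on the ascending
-- # threshold list (idiomatic; same guards, same results).
-- from bisect import bisect_right
-- from typing import Optional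
--
-- DIFF_THRESHOLDS = {
--     "guitar":     [139, 176, 221, 267, 333, 409],
--     "drums":      [124, 151, 178, 242, 345, 448],
--     "bass":       [135, 181, 228, 293, 364, 436],
--     "vocals":     [132, 175, 218, 279, 353, 427],
--     "band":       [163, 215, 243, 267, 292, 345],
--     "keys":       [153, 211, 269, 327, 385, 443],
--     "prokeys":    [153, 211, 269, 327, 385, 443],
--     "proguitar":  [150, 205, 264, 323, 382, 442],
--     "probass":    [150, 208, 267, 325, 384, 442],
-- }
--
-- def difficulty_bucket(instr_key, rank_val):
--     """Return 0..5 bucket index for rank_val on instr_key (None if no part)."""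
--     if not rank_val or rank_val <= 0:
--         return None
--     th = DIFF_THRESHOLDS.get(instr_key)
--     if not th:
--         return None
--     return max(bisect_right(th, rank_val) - 1, 0)
-- ===== Notes on version B (the rewrite author's own statement) =====
-- stated objective: idiomatic
-- what changed: The backward linear scan with early return is replaced by a binary search (bisect_right) on the ascending threshold list, returning max(count-1, 0).
import Mathlib
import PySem

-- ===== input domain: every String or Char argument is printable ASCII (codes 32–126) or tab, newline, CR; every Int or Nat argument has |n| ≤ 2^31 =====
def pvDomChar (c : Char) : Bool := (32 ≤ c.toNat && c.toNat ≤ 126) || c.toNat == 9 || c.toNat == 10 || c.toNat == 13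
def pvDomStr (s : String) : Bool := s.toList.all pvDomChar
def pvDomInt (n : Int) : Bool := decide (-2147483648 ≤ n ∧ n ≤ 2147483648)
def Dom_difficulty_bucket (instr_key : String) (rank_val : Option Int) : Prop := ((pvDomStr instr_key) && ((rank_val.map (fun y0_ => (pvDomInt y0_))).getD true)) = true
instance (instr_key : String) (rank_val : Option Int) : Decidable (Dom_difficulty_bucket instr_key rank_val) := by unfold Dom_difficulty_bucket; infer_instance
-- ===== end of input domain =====

-- ===== PORT A =====
-- B changes only the bucket lookup: binary search (bisect_right) instead of the backward linear scan (idiomatic; return value only).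
def pvDIFF : PySem.Dict String (List Int) :=
  ⟨[("guitar",     [139, 176, 221, 267, 333, 409]),
    ("drums",      [124, 151, 178, 242, 345, 448]),
    ("bass",       [135, 181, 228, 293, 364, 436]),
    ("vocals",     [132, 175, 218, 279, 353, 427]),
    ("band",       [163, 215, 243, 267, 292, 345]),
    ("keys",       [153, 211, 269, 327, 385, 443]),
    ("prokeys",    [153, 211, 269, 327, 385, 443]),
    ("proguitar",  [150, 205, 264, 323, 382, 442]),
    ("probass",    [150, 208, 267, 325, 384, 442])]⟩

-- the 'for i in range(len(th)-1, -1, -1): if rank_val >= th[i]: return i' loop, over the range list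
def pvScanA (th : List Int) (v : Int) : List Int → Option Int
  | [] => none
  | i :: rest => if v ≥ PySem.List.pyGetD th i 0 then some i else pvScanA th v rest

def difficulty_bucket (instr_key : String) (rank_val : Option Int) : Option Int :=
  match rank_val with
  | none => none                                  -- 'not rank_val' (None)
  | some v =>
    if v = 0 ∨ v ≤ 0 then none                    -- 'not rank_val or rank_val <= 0'
    else
      match pvDIFF.get? instr_key with
      | none => none                              -- 'not th' (missing key)
      | some th =>
        if th = [] then none                      -- 'not th' (empty list)
        else
          match pvScanA th v (PySem.List.pyRange ((th.length : Int) - 1) (-1) (-1)) with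
          | some i => some i
          | none => some 0

-- ===== PORT B =====
def difficulty_bucket_alt (instr_key : String) (rank_val : Option Int) : Option Int :=
  match rank_val with
  | none => none
  | some v =>
    if v = 0 ∨ v ≤ 0 then none
    else
      match pvDIFF.get? instr_key with
      | none => none
      | some th =>
        if th = [] then none
        else some (max ((PySem.List.bisectRight th v : Int) - 1) 0)

-- ===== PRECONDITION & SPEC =====
def Spec_difficulty_bucket (instr_key : String) (rank_val : Option Int) (out : Option Int) : Prop := out = difficulty_bucket_alt instr_key rank_val
instance (instr_key : String) (rank_val : Option Int) (out : Option Int) : Decidable (Spec_difficulty_bucket instr_key rank_val out) := by unfold Spec_difficulty_bucket; infer_instance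

-- ===== CLAIM (what is proved, stated in full; the proofs are below) =====
def Claim_equal_difficulty_bucket : Prop := ∀ (instr_key : String) (rank_val : Option Int), Dom_difficulty_bucket instr_key rank_val → Spec_difficulty_bucket instr_key rank_val (difficulty_bucket instr_key rank_val)

-- ===== LEMMAS AND PROOFS =====

-- ===== VERDICT (by name: the statement is the Claim_ definition above) =====
set_option maxHeartbeats 2000000 in
theorem difficulty_bucket_spec : Claim_equal_difficulty_bucket := by
  intro instr_key rank_val _
  unfold Spec_difficulty_bucket difficulty_bucket difficulty_bucket_alt
  cases rank_val with
  | none => rfl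
  | some v =>
    by_cases hv : v = 0 ∨ v ≤ 0
    · simp [hv]
    · simp only [if_neg hv]
      rcases hget : pvDIFF.get? instr_key with _ | th
      · rfl
      · have hmem := PySem.Dict.mem_items_of_get?_eq_some pvDIFF hget
        simp only [pvDIFF, List.mem_cons, List.not_mem_nil, or_false,
          Prod.mk.injEq] at hmem
        have hr : PySem.List.pyRange ((5 : Int)) (-1) (-1) = [5, 4, 3, 2, 1, 0] := by decide
        rcases hmem with ⟨-, rfl⟩ | ⟨-, rfl⟩ | ⟨-, rfl⟩ | ⟨-, rfl⟩ | ⟨-, rfl⟩ | ⟨-, rfl⟩ |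
          ⟨-, rfl⟩ | ⟨-, rfl⟩ | ⟨-, rfl⟩ <;>
          · simp only [List.length_cons, List.length_nil]
            norm_num [hr, pvScanA, PySem.List.pyGetD, PySem.List.pyGet?, PySem.List.pyIdx?,
              PySem.List.bisectRight, PySem.List.bisectRightLoop, (show ((5:Int).toNat) = 5 from rfl), (show ((4:Int).toNat) = 4 from rfl), (show ((3:Int).toNat) = 3 from rfl), (show ((2:Int).toNat) = 2 from rfl), (show ((1:Int).toNat) = 1 from rfl), (show ((0:Int).toNat) = 0 from rfl)]
            split_ifs <;> first | rfl | omega
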